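-- pv_equiv track=rewrite | github.com/EBI-Metagenomics/biosiftr_extended_methods | scripts/ranks_aggregator.py | lineage_breaker
-- ===== SOURCE A (Python) =====
-- def add_ranks( composite_key, aggregated_dict, current_values ):
--     if composite_key in aggregated_dict:
--         saved_values = aggregated_dict[composite_key]
--         added_values = [x + y for x, y in zip(saved_values, current_values)]
--         aggregated_dict[composite_key] = added_values
--     else:
--         aggregated_dict[composite_key] = current_values
--
--     return aggregated_dict
--
-- def lineage_breaker( tax_dict ):
--     # Aggregating counts per taxonomic label
--     aggregated_dict = {}
--     tax_levels = {
--         0 : 'domain',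
--         1 : 'phylum',
--         2 : 'class',
--         3 : 'order',
--         4 : 'family',
--         5 : 'genus',
--         6 : 'species'
--     }
--     for lineage in tax_dict:
--         current_values = tax_dict[lineage]
--         ranks = lineage.split(';')
--
--         # Aggregating at each taxonomic level
--         for index in tax_levels:
--             if len(ranks) >= index+1:
--                 composite_key = ( tax_levels[index], ranks[index] )
--                 aggregated_dict = add_ranks( composite_key, aggregated_dict, current_values )
--
--     return(aggregated_dict)
-- ===== SOURCE B (Python) =====
-- from functools import reduce
--
-- _LEVELS = ('domain', 'phylum', 'class', 'order', 'family', 'genus', 'species')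
--
--
-- def lineage_breaker(tax_dict):
--     # First pass: group the value vectors per (level name, rank) key, in encounter order.
--     groups = {}
--     for lineage, values in tax_dict.items():
--         for name, rank in zip(_LEVELS, lineage.split(';')):
--             groups.setdefault((name, rank), []).append(values)
--     # Second pass: element-wise sum of each group, seeded with its first vector.
--     return {
--         key: reduce(lambda a, b: [x + y for x, y in zip(a, b)], vectors)
--         for key, vectors in groups.items()
--     }
-- ===== Notes on version B (the rewrite author's own statement) =====
-- stated objective: alternative
-- what changed: A updates the aggregate dict with an element-wise vector addition at every (level, rank) event; B first groups all value vectors per (level, rank) key in one pass and then reduces each group to its element-wise sum, seeded with the group's first vector.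
import Mathlib
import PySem

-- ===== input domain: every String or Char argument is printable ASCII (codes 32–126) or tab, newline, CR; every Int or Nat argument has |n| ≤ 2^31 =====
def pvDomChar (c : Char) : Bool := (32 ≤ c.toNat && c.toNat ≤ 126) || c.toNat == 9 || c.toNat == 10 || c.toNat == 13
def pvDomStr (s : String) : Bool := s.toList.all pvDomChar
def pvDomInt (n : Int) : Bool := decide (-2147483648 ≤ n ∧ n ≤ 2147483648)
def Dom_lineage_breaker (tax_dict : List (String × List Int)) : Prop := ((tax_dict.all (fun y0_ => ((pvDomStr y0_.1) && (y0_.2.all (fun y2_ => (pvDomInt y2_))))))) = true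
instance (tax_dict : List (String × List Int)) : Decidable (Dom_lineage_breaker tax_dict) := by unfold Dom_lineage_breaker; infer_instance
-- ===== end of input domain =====

-- B groups the per-level value vectors under each (level, rank) key in one pass and then
-- element-wise-sums each group (seeded with its first vector), instead of A's fold that
-- updates the aggregate dict at every single event; same return value, different decomposition.

-- ===== PORT A =====
def pvZipAdd (xs ys : List Int) : List Int := (xs.zip ys).map (fun p => p.1 + p.2)

def pvAddRanks (composite_key : String × String)
    (aggregated_dict : PySem.Dict (String × String) (List Int)) (current_values : List Int) :
    PySem.Dict (String × String) (List Int) :=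
  if aggregated_dict.contains composite_key then
    aggregated_dict.insert composite_key
      (pvZipAdd (aggregated_dict.getD composite_key []) current_values)
  else
    aggregated_dict.insert composite_key current_values

def pvTaxLevels : PySem.Dict Int String :=
  PySem.Dict.ofList [(0, "domain"), (1, "phylum"), (2, "class"), (3, "order"),
    (4, "family"), (5, "genus"), (6, "species")]

def lineage_breaker (tax_dict : List (String × List Int)) : List (String × String × List Int) :=
  let d := PySem.Dict.ofList tax_dict
  let agg := d.keys.foldl (init := (PySem.Dict.empty : PySem.Dict (String × String) (List Int)))
    (fun agg lineage =>
      let current_values := d.getD lineage []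
      let ranks := (PySem.Str.split? lineage ";").getD []
      pvTaxLevels.keys.foldl (init := agg) (fun agg index =>
        if PySem.List.len ranks ≥ index + 1 then
          pvAddRanks (pvTaxLevels.getD index "", PySem.List.pyGetD ranks index "") agg current_values
        else agg))
  agg.items.map (fun q => (q.1.1, q.1.2, q.2))

-- ===== PORT B =====
def pvLevels : List String := ["domain", "phylum", "class", "order", "family", "genus", "species"]

def pvVecAdd (a b : List Int) : List Int := (a.zip b).map (fun p => p.1 + p.2)

def pvReduceAdd (vectors : List (List Int)) : List Int :=
  match vectors with
  | [] => []                       -- unreachable: every group holds at least one vector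
  | v :: rest => rest.foldl pvVecAdd v

def lineage_breaker_alt (tax_dict : List (String × List Int)) : List (String × String × List Int) :=
  let groups := (PySem.Dict.ofList tax_dict).items.foldl
    (init := (PySem.Dict.empty : PySem.Dict (String × String) (List (List Int))))
    (fun groups p =>
      (pvLevels.zip ((PySem.Str.split? p.1 ";").getD [])).foldl
        (fun groups nr => groups.modify nr [] (· ++ [p.2])) groups)
  groups.items.map (fun q => (q.1.1, q.1.2, pvReduceAdd q.2))

-- ===== PRECONDITION & SPEC =====
def Spec_lineage_breaker (tax_dict : List (String × List Int)) (out : List (String × String × List Int)) : Prop := out = lineage_breaker_alt tax_dict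
instance (tax_dict : List (String × List Int)) (out : List (String × String × List Int)) : Decidable (Spec_lineage_breaker tax_dict out) := by unfold Spec_lineage_breaker; infer_instance

-- ===== CLAIM (what is proved, stated in full; the proofs are below) =====
def Claim_equal_lineage_breaker : Prop := ∀ (tax_dict : List (String × List Int)), Dom_lineage_breaker tax_dict → Spec_lineage_breaker tax_dict (lineage_breaker tax_dict)

-- ===== LEMMAS AND PROOFS =====

-- reduce an aggregated-groups entry to A's summed entry
def pvRed (q : (String × String) × List (List Int)) : (String × String) × List Int :=
  (q.1, pvReduceAdd q.2)

theorem pvReduceAdd_append (vs : List (List Int)) (v : List Int) (h : vs ≠ []) :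
    pvReduceAdd (vs ++ [v]) = pvVecAdd (pvReduceAdd vs) v := by
  cases vs with
  | nil => exact absurd rfl h
  | cons a t => simp [pvReduceAdd, List.foldl_append]

theorem pv_contains_red (g : PySem.Dict (String × String) (List (List Int))) (k : String × String) :
    (PySem.Dict.mk (g.items.map pvRed)).contains k = g.contains k := by
  simp only [PySem.Dict.contains, List.any_map]
  exact PySem.List.any_congr_mem (fun p _ => by simp [pvRed, Function.comp])

theorem pv_get?_red (g : PySem.Dict (String × String) (List (List Int))) (k : String × String) :
    (PySem.Dict.mk (g.items.map pvRed)).get? k = (g.get? k).map (fun vs => pvReduceAdd vs) := by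
  simp only [PySem.Dict.get?, List.find?_map]
  have h : ((fun p : (String × String) × List Int => p.1 == k) ∘ pvRed)
      = (fun p : (String × String) × List (List Int) => p.1 == k) := by
    funext p; simp [pvRed, Function.comp]
  rw [h]
  cases List.find? (fun p => p.1 == k) g.1 <;> simp [pvRed]

-- one grouping event corresponds to one add_ranks event
theorem pv_step (g : PySem.Dict (String × String) (List (List Int)))
    (hne : ∀ q ∈ g.items, q.2 ≠ [])
    (k : String × String) (v : List Int) :
    pvAddRanks k ⟨g.items.map pvRed⟩ v = ⟨(g.modify k [] (· ++ [v])).items.map pvRed⟩ := by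
  unfold pvAddRanks PySem.Dict.modify
  rw [pv_contains_red]
  by_cases hC : g.contains k = true
  · rw [if_pos hC]
    cases hfs : List.find? (fun p => p.1 == k) g.items with
    | none =>
      exfalso
      simp only [PySem.Dict.contains, List.any_eq_true] at hC
      obtain ⟨p, hp, hpk⟩ := hC
      have := List.find?_eq_none.mp hfs p hp
      simp_all
    | some p =>
      have hp2 : p.2 ≠ [] := hne p (List.mem_of_find?_eq_some hfs)
      have hget : g.get? k = some p.2 := by simp [PySem.Dict.get?, hfs]
      have hgetD : g.getD k [] = p.2 := by simp [PySem.Dict.getD, hget]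
      have hgetDred : (PySem.Dict.mk (g.items.map pvRed)).getD k [] = pvReduceAdd p.2 := by
        simp [PySem.Dict.getD, pv_get?_red, hget]
      rw [hgetD, hgetDred]
      unfold PySem.Dict.insert
      rw [pv_contains_red, if_pos hC, if_pos hC]
      show PySem.Dict.mk _ = PySem.Dict.mk _
      congr 1
      simp only [List.map_map]
      apply List.map_congr_left
      intro q _
      by_cases hq : q.1 == k
      · simp [Function.comp, pvRed, hq, pvReduceAdd_append p.2 v hp2]
        rfl
      · simp [Function.comp, pvRed, hq]
  · rw [if_neg hC]
    have hfind : List.find? (fun p => p.1 == k) g.items = none := by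
      rw [List.find?_eq_none]
      intro p hp
      by_contra hb
      exact hC (List.any_eq_true.mpr ⟨p, hp, by simpa using hb⟩)
    have hgetD : g.getD k [] = [] := by
      simp [PySem.Dict.getD, PySem.Dict.get?, hfind]
    rw [hgetD]
    unfold PySem.Dict.insert
    rw [pv_contains_red, if_neg hC, if_neg hC]
    show PySem.Dict.mk _ = PySem.Dict.mk _
    congr 1
    simp [pvRed, pvReduceAdd]

-- folding A's add_ranks events equals grouping them and reducing each group
theorem pv_main (E : List ((String × String) × List Int))
    (g : PySem.Dict (String × String) (List (List Int)))
    (hne : ∀ q ∈ g.items, q.2 ≠ []) :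
    E.foldl (fun agg e => pvAddRanks e.1 agg e.2) ⟨g.items.map pvRed⟩
      = ⟨(E.foldl (fun g e => g.modify e.1 [] (· ++ [e.2])) g).items.map pvRed⟩ := by
  induction E generalizing g with
  | nil => rfl
  | cons e E ih =>
    simp only [List.foldl_cons]
    rw [pv_step g hne e.1 e.2]
    apply ih
    intro q hq
    unfold PySem.Dict.modify at hq
    rcases (PySem.Dict.mem_items_insert _ _ _ _).mp hq with h | ⟨hq', _⟩
    · subst h; simp
    · exact hne q hq'

-- A's inner loop over the 7 rank indices is the fold over the zip of level names with ranks.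
set_option maxHeartbeats 1000000 in
theorem pv_inner_eq (ranks : List String)
    (agg : PySem.Dict (String × String) (List Int)) (cur : List Int) :
    pvTaxLevels.keys.foldl (init := agg) (fun agg index =>
        if PySem.List.len ranks ≥ index + 1 then
          pvAddRanks (pvTaxLevels.getD index "", PySem.List.pyGetD ranks index "") agg cur
        else agg)
      = (pvLevels.zip ranks).foldl (fun agg nr => pvAddRanks nr agg cur) agg := by
  have hk : pvTaxLevels.keys = [0,1,2,3,4,5,6] := by decide
  have h0 : pvTaxLevels.getD 0 "" = "domain" := by decide
  have h1 : pvTaxLevels.getD 1 "" = "phylum" := by decide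
  have h2 : pvTaxLevels.getD 2 "" = "class" := by decide
  have h3 : pvTaxLevels.getD 3 "" = "order" := by decide
  have h4 : pvTaxLevels.getD 4 "" = "family" := by decide
  have h5 : pvTaxLevels.getD 5 "" = "genus" := by decide
  have h6 : pvTaxLevels.getD 6 "" = "species" := by decide
  rw [hk]
  match ranks with
  | [] => simp [pvLevels, PySem.List.len]
  | [r0] => simp [pvLevels, PySem.List.len, PySem.List.pyGetD_ofNat', h0]
  | [r0,r1] => simp [pvLevels, PySem.List.len, PySem.List.pyGetD_ofNat', h0, h1]
  | [r0,r1,r2] => simp [pvLevels, PySem.List.len, PySem.List.pyGetD_ofNat', h0, h1, h2]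
  | [r0,r1,r2,r3] => simp [pvLevels, PySem.List.len, PySem.List.pyGetD_ofNat', h0, h1, h2, h3]
  | [r0,r1,r2,r3,r4] => simp [pvLevels, PySem.List.len, PySem.List.pyGetD_ofNat', h0, h1, h2, h3, h4]
  | [r0,r1,r2,r3,r4,r5] => simp [pvLevels, PySem.List.len, PySem.List.pyGetD_ofNat', h0, h1, h2, h3, h4, h5]
  | r0::r1::r2::r3::r4::r5::r6::rest =>
    simp [pvLevels, PySem.List.pyGetD_ofNat', h0, h1, h2, h3, h4, h5, h6]
    rw [if_pos (show (0:Int) ≤ (rest.length:Int) + 1 + 1 + 1 + 1 + 1 from by positivity),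
        if_pos (show (2:Int) ≤ (rest.length:Int) + 1 + 1 + 1 + 1 + 1 + 1 from by omega),
        if_pos (show (3:Int) ≤ (rest.length:Int) + 1 + 1 + 1 + 1 + 1 + 1 from by omega),
        if_pos (show (4:Int) ≤ (rest.length:Int) + 1 + 1 + 1 + 1 + 1 + 1 from by omega),
        if_pos (show (5:Int) ≤ (rest.length:Int) + 1 + 1 + 1 + 1 + 1 + 1 from by omega),
        if_pos (show (6:Int) ≤ (rest.length:Int) + 1 + 1 + 1 + 1 + 1 + 1 from by omega)]
    rfl

-- ===== VERDICT (by name: the statement is the Claim_ definition above) =====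
theorem lineage_breaker_spec : Claim_equal_lineage_breaker := by
  intro tax_dict _
  unfold Spec_lineage_breaker lineage_breaker lineage_breaker_alt
  simp only []
  set d := PySem.Dict.ofList tax_dict with hd
  -- the flat stream of (composite key, value vector) events, in A's/B's shared order
  set rk : String → List String := fun s => (PySem.Str.split? s ";").getD [] with hrk
  set E : List ((String × String) × List Int) :=
    d.items.flatMap (fun p => (pvLevels.zip (rk p.1)).map (fun nr => (nr, p.2))) with hE
  -- A's aggregate equals the fold of add_ranks over E
  have hA : d.keys.foldl (init := (PySem.Dict.empty : PySem.Dict (String × String) (List Int)))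
      (fun agg lineage =>
        pvTaxLevels.keys.foldl (init := agg) (fun agg index =>
          if PySem.List.len (rk lineage) ≥ index + 1 then
            pvAddRanks (pvTaxLevels.getD index "", PySem.List.pyGetD (rk lineage) index "") agg
              (d.getD lineage [])
          else agg))
      = E.foldl (fun agg e => pvAddRanks e.1 agg e.2) PySem.Dict.empty := by
    rw [hE, List.foldl_flatMap]
    rw [PySem.Dict.items_eq_map_keys d (PySem.Dict.nodup_keys_ofList tax_dict) []]
    rw [List.foldl_map]
    apply PySem.List.foldl_congr_mem
    intro acc lineage _
    rw [pv_inner_eq (rk lineage) acc (d.getD lineage []), List.foldl_map]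
  -- B's groups equal the grouping fold over E
  have hB : d.items.foldl
      (init := (PySem.Dict.empty : PySem.Dict (String × String) (List (List Int))))
      (fun groups p =>
        (pvLevels.zip (rk p.1)).foldl (fun groups nr => groups.modify nr [] (· ++ [p.2])) groups)
      = E.foldl (fun g e => g.modify e.1 [] (· ++ [e.2])) PySem.Dict.empty := by
    rw [hE, List.foldl_flatMap]
    apply PySem.List.foldl_congr_mem
    intro acc p _
    rw [List.foldl_map]
  rw [hA, hB]
  rw [show (PySem.Dict.empty : PySem.Dict (String × String) (List Int))
        = ⟨(PySem.Dict.empty : PySem.Dict (String × String) (List (List Int))).items.map pvRed⟩ from rfl]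
  rw [pv_main E PySem.Dict.empty (by intro q hq; simp [PySem.Dict.empty] at hq)]
  simp only [List.map_map]
  rfl
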